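-- pv_equiv track=rewrite | github.com/AndresCagua/hello-git | helloGit2.py | findMissingOperationIndex
-- ===== SOURCE A (Python) =====
-- from typing import List
--
-- def findMissingOperationIndex(ops: List[str], missingOp: str, currentTop: int) -> int:
--     n = len(ops)
--
--     # Intenta insertar la operación faltante en cada posición
--     for i in range(n + 1):
--         stack = []
--         temp_ops = ops[:i] + [missingOp] + ops[i:]  # Inserta missingOp en la posición i
--
--         valid = True
--         for op in temp_ops:
--             if op.startswith("PUSH"):
--                 _, x = op.split()
--                 stack.append(int(x))
--             elif op == "POP":
--                 if not stack:
--                     valid = False  # No se puede hacer POP con la pila vacía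
--                     break
--                 stack.pop()
--
--         if valid and stack and stack[-1] == currentTop:
--             return i
--
--     return -1  # No se encontró una posición válida (esto no debería pasar según la consigna)
-- ===== SOURCE B (Python) =====
-- from typing import List
--
-- def findMissingOperationIndex(ops: List[str], missingOp: str, currentTop: int) -> int:
--     # O(n): summarize every suffix as "pop a items, then push l items whose top is t",
--     # maintain the prefix stack once, and test each insertion point in O(1).
--     def parse(op):
--         if op.startswith("PUSH"):
--             _, x = op.split()
--             return ("push", int(x))
--         if op == "POP":
--             return ("pop", 0)
--         return ("noop", 0)
--
--     effs = [parse(op) for op in ops]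
--     mtag, mv = parse(missingOp)
--     n = len(ops)
--
--     suf = [(0, 0, 0)] * (n + 1)
--     a = l = t = 0
--     for i in range(n - 1, -1, -1):
--         tag, v = effs[i]
--         if tag == "push":
--             if a > 0:
--                 a -= 1
--             else:
--                 if l == 0:
--                     t = v
--                 l += 1
--         elif tag == "pop":
--             a += 1
--         suf[i] = (a, l, t)
--
--     stack = []
--     for i in range(n + 1):
--         a, l, t = suf[i]
--         # stack after inserting missingOp at position i, described without copying
--         if mtag == "pop":
--             ok = len(stack) > 0
--             slen = len(stack) - 1
--         elif mtag == "push":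
--             ok = True
--             slen = len(stack) + 1
--         else:
--             ok = True
--             slen = len(stack)
--         if ok and slen >= a:
--             flen = slen - a + l
--             if flen >= 1:
--                 if l > 0:
--                     top = t
--                 else:
--                     j = slen - a - 1
--                     if mtag == "push" and j == len(stack):
--                         top = mv
--                     else:
--                         top = stack[j]
--                 if top == currentTop:
--                     return i
--         if i < n:
--             tag, v = effs[i]
--             if tag == "push":
--                 stack.append(v)
--             elif tag == "pop":
--                 if not stack:
--                     break
--                 stack.pop()
--     return -1
-- ===== Notes on version B (the rewrite author's own statement) =====
-- stated objective: faster
-- what changed: A re-simulates the whole instruction list for each of the n+1 insertion points (O(n^2)); B parses once, summarizes every suffix right-to-left as 'pop a, then push l items with top t', maintains the prefix stack in one left-to-right sweep, and tests each insertion point in O(1), for O(n) total. Pre_ excludes inputs in which some string starts with 'PUSH' but is not 'PUSH <int>' (these raise ValueError when executed; A may still return -1 when every simulation breaks before reaching the malformed op, while B, which parses all instructions upfront, raises there).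
-- outside the precondition, e.g. on findMissingOperationIndex(['POP', 'PUSH'], 'POP', 0): A returns -1, B raises ValueError
import Mathlib
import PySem

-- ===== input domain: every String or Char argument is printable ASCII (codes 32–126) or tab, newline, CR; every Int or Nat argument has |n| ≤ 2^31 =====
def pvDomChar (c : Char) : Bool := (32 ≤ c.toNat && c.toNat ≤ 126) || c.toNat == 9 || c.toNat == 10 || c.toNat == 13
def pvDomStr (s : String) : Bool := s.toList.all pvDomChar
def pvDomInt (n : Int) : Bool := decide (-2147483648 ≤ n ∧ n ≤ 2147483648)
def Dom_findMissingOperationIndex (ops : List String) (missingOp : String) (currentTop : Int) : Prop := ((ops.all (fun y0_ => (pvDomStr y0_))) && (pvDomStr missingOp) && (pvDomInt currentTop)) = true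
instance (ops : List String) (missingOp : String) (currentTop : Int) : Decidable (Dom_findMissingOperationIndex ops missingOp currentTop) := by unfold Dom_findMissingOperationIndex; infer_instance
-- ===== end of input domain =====

-- B replaces A's per-insertion-point re-simulation by one-pass suffix summaries plus an
-- incrementally maintained prefix stack (objective: faster, O(n) instead of O(n^2)).

-- ===== PORT A =====
-- inner loop of A: `for op in temp_ops: …` with `valid = False; break`; returns (stack, valid).
-- `_, x = op.split(); stack.append(int(x))`: the `.getD` fallbacks are unreachable under Pre_.
def pvSimA : List String → List Int → (List Int × Bool)
  | [], stack => (stack, true)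
  | op :: rest, stack =>
    if PySem.Str.startswith op "PUSH" then
      pvSimA rest (stack ++ [(PySem.Int.ofStr? ((PySem.Str.split₀ op).getD 1 "")).getD 0])
    else if op = "POP" then
      if stack = [] then (stack, false) else pvSimA rest stack.dropLast
    else pvSimA rest stack

-- `temp_ops = ops[:i] + [missingOp] + ops[i:]` then `if valid and stack and stack[-1] == currentTop`
def pvCondA (ops : List String) (mo : String) (ct : Int) (i : Nat) : Bool :=
  let r := pvSimA (ops.take i ++ [mo] ++ ops.drop i) []
  r.2 && decide (r.1 ≠ []) && decide (PySem.List.pyGet? r.1 (-1) = some ct)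

-- `for i in range(n + 1): … return i` / fall through to `return -1`; k counts remaining iterations
def pvLoopA (ops : List String) (mo : String) (ct : Int) : Nat → Nat → Int
  | _, 0 => -1
  | i, k + 1 => if pvCondA ops mo ct i then (i : Int) else pvLoopA ops mo ct (i + 1) k

def findMissingOperationIndex (ops : List String) (missingOp : String) (currentTop : Int) : Int :=
  pvLoopA ops missingOp currentTop 0 (ops.length + 1)

-- ===== PORT B =====
-- Source B's parse(op) -> ("push", v) / ("pop", 0) / ("noop", 0)
def pvParseB (op : String) : String × Int :=
  if PySem.Str.startswith op "PUSH" then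
    ("push", (PySem.Int.ofStr? ((PySem.Str.split₀ op).getD 1 "")).getD 0)
  else if op = "POP" then ("pop", 0)
  else ("noop", 0)

-- Source B's right-to-left loop building suf: suf[i] = (a, l, t) for the suffix effs[i:]
def pvSufB : List (String × Int) → List (Int × Int × Int)
  | [] => [(0, 0, 0)]
  | (tag, v) :: rest =>
    let s := pvSufB rest
    let p := s.headD (0, 0, 0)
    let cur : Int × Int × Int :=
      if tag = "push" then
        (if p.1 > 0 then (p.1 - 1, p.2.1, p.2.2)
         else (p.1, p.2.1 + 1, if p.2.1 = 0 then v else p.2.2))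
      else if tag = "pop" then (p.1 + 1, p.2.1, p.2.2)
      else p
    cur :: s

-- the O(1) test at insertion point i (the body of Source B's `for i in range(n + 1)` up to `return i`)
def pvHitB (mtag : String) (mv ct : Int) (a l t : Int) (stack : List Int) : Bool :=
  let L : Int := stack.length
  let ok : Bool := if mtag = "pop" then decide (0 < stack.length) else true
  let slen : Int := if mtag = "pop" then L - 1 else if mtag = "push" then L + 1 else L
  ok && decide (a ≤ slen) && decide (1 ≤ slen - a + l) &&
    (let top : Int :=
       if 0 < l then t
       else if mtag = "push" && decide (slen - a - 1 = L) then mv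
       else (PySem.List.pyGet? stack (slen - a - 1)).getD 0
     decide (top = ct))

-- Source B's main loop: per i test pvHitB, then advance the prefix stack with effs[i] (break on bad POP)
def pvLoopB (mtag : String) (mv ct : Int) : Nat → List (String × Int) → List (Int × Int × Int) → List Int → Int
  | _, _, [], _ => -1
  | i, effs, (a, l, t) :: sufrest, stack =>
    if pvHitB mtag mv ct a l t stack then (i : Int)
    else
      match effs with
      | [] => -1
      | (tag, v) :: erest =>
        if tag = "push" then pvLoopB mtag mv ct (i + 1) erest sufrest (stack ++ [v])
        else if tag = "pop" then
          if stack = [] then -1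
          else pvLoopB mtag mv ct (i + 1) erest sufrest stack.dropLast
        else pvLoopB mtag mv ct (i + 1) erest sufrest stack

def findMissingOperationIndex_alt (ops : List String) (missingOp : String) (currentTop : Int) : Int :=
  let effs := ops.map pvParseB
  let m := pvParseB missingOp
  pvLoopB m.1 m.2 currentTop 0 effs (pvSufB effs) []

-- ===== PRECONDITION & SPEC =====
-- a PUSH-prefixed instruction is well-formed: exactly two whitespace-separated tokens, second an int literal
def pvWF (op : String) : Bool :=
  !(PySem.Str.startswith op "PUSH") ||
    (decide ((PySem.Str.split₀ op).length = 2) &&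
     (PySem.Int.ofStr? ((PySem.Str.split₀ op).getD 1 "")).isSome)

-- Pre_ excludes inputs in which some string starts with "PUSH" but is not "PUSH <int>": executing such an
-- op raises ValueError; A may still return -1 when every simulation breaks before reaching it, while B
-- (which parses every instruction upfront) raises there.
def Pre_findMissingOperationIndex (ops : List String) (missingOp : String) (currentTop : Int) : Prop :=
  (ops.all pvWF && pvWF missingOp) = true
instance (ops : List String) (missingOp : String) (currentTop : Int) : Decidable (Pre_findMissingOperationIndex ops missingOp currentTop) := by unfold Pre_findMissingOperationIndex; infer_instance

def pvWitness_findMissingOperationIndex : List String × String × Int := (["PUSH 1", "POP"], "PUSH 2", 2)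

def Spec_findMissingOperationIndex (ops : List String) (missingOp : String) (currentTop : Int) (out : Int) : Prop := out = findMissingOperationIndex_alt ops missingOp currentTop
instance (ops : List String) (missingOp : String) (currentTop : Int) (out : Int) : Decidable (Spec_findMissingOperationIndex ops missingOp currentTop out) := by unfold Spec_findMissingOperationIndex; infer_instance

-- ===== CLAIM (what is proved, stated in full; the proofs are below) =====
def Claim_equal_findMissingOperationIndex : Prop := ∀ (ops : List String) (missingOp : String) (currentTop : Int), Dom_findMissingOperationIndex ops missingOp currentTop → Pre_findMissingOperationIndex ops missingOp currentTop → Spec_findMissingOperationIndex ops missingOp currentTop (findMissingOperationIndex ops missingOp currentTop)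

-- ===== LEMMAS AND PROOFS =====

-- semantic mid-level: run a parsed instruction list on a stack; none = POP on empty
def pvRun : List (String × Int) → List Int → Option (List Int)
  | [], s => some s
  | (tag, v) :: r, s =>
    if tag = "push" then pvRun r (s ++ [v])
    else if tag = "pop" then (if s = [] then none else pvRun r s.dropLast)
    else pvRun r s

-- normal form of an instruction list: pop (pvA E) items, then push the list (pvL E)
def pvA : List (String × Int) → Nat
  | [] => 0
  | (tag, _) :: r => if tag = "push" then pvA r - 1 else if tag = "pop" then pvA r + 1 else pvA r

def pvL : List (String × Int) → List Int
  | [] => []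
  | (tag, v) :: r => if tag = "push" then (if 0 < pvA r then pvL r else v :: pvL r) else pvL r

theorem pvSimA_run : ∀ (t : List String) (s : List Int),
    (if (pvSimA t s).2 then some (pvSimA t s).1 else none) = pvRun (t.map pvParseB) s := by
  intro t
  induction t with
  | nil => intro s; simp [pvSimA, pvRun]
  | cons op rest ih =>
    intro s
    by_cases h1 : PySem.Chars.startswith op.toList ['P','U','S','H'] = true
    · simp [pvSimA, pvParseB, pvRun, h1, ih]
    · have hd : PySem.Chars.startswith ['P','O','P'] ['P','U','S','H'] = false := by decide
      by_cases h2 : op = "POP"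
      · by_cases h3 : s = []
        · simp [pvSimA, pvParseB, pvRun, h1, h2, h3, hd]
        · simp [pvSimA, pvParseB, pvRun, h1, h2, h3, hd, ih]
      · simp [pvSimA, pvParseB, pvRun, h1, h2, ih]

theorem pvRun_append : ∀ (xs ys : List (String × Int)) (s : List Int),
    pvRun (xs ++ ys) s = (pvRun xs s).bind (pvRun ys) := by
  intro xs ys
  induction xs with
  | nil => intro s; simp [pvRun]
  | cons e r ih =>
    intro s
    obtain ⟨tag, v⟩ := e
    by_cases h1 : tag = "push"
    · simp [pvRun, h1, ih]
    · by_cases h2 : tag = "pop"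
      · by_cases h3 : s = [] <;> simp [pvRun, h1, h2, h3, ih]
      · simp [pvRun, h1, h2, ih]

theorem pvRun_char : ∀ (E : List (String × Int)) (s : List Int),
    pvRun E s = if pvA E ≤ s.length then some (s.take (s.length - pvA E) ++ pvL E) else none := by
  intro E
  induction E with
  | nil => intro s; simp [pvRun, pvA, pvL]
  | cons e r ih =>
    intro s
    obtain ⟨tag, v⟩ := e
    by_cases h1 : tag = "push"
    · rw [show pvRun ((tag, v) :: r) s = pvRun r (s ++ [v]) by simp [pvRun, h1]]
      rw [ih]
      by_cases h0 : 0 < pvA r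
      · have hA : pvA ((tag, v) :: r) = pvA r - 1 := by simp [pvA, h1]
        have hL : pvL ((tag, v) :: r) = pvL r := by simp [pvL, h1, h0]
        rw [hA, hL]
        simp only [List.length_append, List.length_singleton]
        by_cases hle : pvA r ≤ s.length + 1
        · rw [if_pos hle, if_pos (by omega)]
          have : (s ++ [v]).take (s.length + 1 - pvA r) = s.take (s.length - (pvA r - 1)) := by
            rw [List.take_append_of_le_length (by omega)]
            congr 1; omega
          rw [this]
        · rw [if_neg hle, if_neg (by omega)]
      · have hz : pvA r = 0 := by omega
        have hA : pvA ((tag, v) :: r) = 0 := by simp [pvA, h1, hz]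
        have hL : pvL ((tag, v) :: r) = v :: pvL r := by simp [pvL, h1, h0]
        rw [hA, hL, hz]
        simp only [List.length_append, List.length_singleton, Nat.sub_zero, Nat.zero_le, if_pos]
        rw [List.take_of_length_le (by simp), List.take_of_length_le (by simp)]
        simp
    · by_cases h2 : tag = "pop"
      · by_cases h3 : s = []
        · subst h2 h3
          simp [pvRun, pvA]
        · rw [show pvRun ((tag, v) :: r) s = pvRun r s.dropLast by simp [pvRun, h1, h2, h3]]
          rw [ih]
          have hA : pvA ((tag, v) :: r) = pvA r + 1 := by simp [pvA, h1, h2]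
          have hL : pvL ((tag, v) :: r) = pvL r := by simp [pvL, h1, h2]
          have hlen : s.dropLast.length = s.length - 1 := by simp [List.length_dropLast]
          have hpos : 1 ≤ s.length := List.length_pos_of_ne_nil h3
          rw [hA, hL, hlen]
          by_cases hle : pvA r ≤ s.length - 1
          · rw [if_pos hle, if_pos (by omega)]
            have : s.dropLast.take (s.length - 1 - pvA r) = s.take (s.length - (pvA r + 1)) := by
              rw [List.dropLast_eq_take, List.take_take]
              congr 1; omega
            rw [this]
          · rw [if_neg hle, if_neg (by omega)]
      · have hA : pvA ((tag, v) :: r) = pvA r := by simp [pvA, h1, h2]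
        have hL : pvL ((tag, v) :: r) = pvL r := by simp [pvL, h1, h2]
        rw [show pvRun ((tag, v) :: r) s = pvRun r s by simp [pvRun, h1, h2]]
        rw [ih, hA, hL]

theorem pvSufB_head : ∀ (E : List (String × Int)), ∃ t : Int,
    (pvSufB E).headD (0, 0, 0) = ((pvA E : Int), ((pvL E).length : Int), t) ∧
      (pvL E ≠ [] → (pvL E).getLast? = some t) := by
  intro E
  induction E with
  | nil => exact ⟨0, by simp [pvSufB, pvA, pvL], by simp [pvL]⟩
  | cons e r ih =>
    obtain ⟨tag, v⟩ := e
    obtain ⟨t, hh, ht⟩ := ih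
    replace hh : (pvSufB r).head?.getD (0, 0, 0) = ((pvA r : Int), ((pvL r).length : Int), t) := by
      simpa using hh
    by_cases h1 : tag = "push"
    · by_cases h0 : 0 < pvA r
      · refine ⟨t, ?_, ?_⟩
        · have hc : ((pvA r - 1 : Nat) : Int) = (pvA r : Int) - 1 := by omega
          have hgt : ((pvA r : Int)) > 0 := by exact_mod_cast h0
          simp [pvSufB, hh, h1, hgt, pvA, pvL, h0, hc]
        · intro hne
          have : pvL ((tag, v) :: r) = pvL r := by simp [pvL, h1, h0]
          rw [this] at hne ⊢
          exact ht hne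
      · have hz : pvA r = 0 := by omega
        have hng : ¬ ((pvA r : Int) > 0) := by simp [hz]
        refine ⟨if pvL r = [] then v else t, ?_, ?_⟩
        · by_cases he : pvL r = []
          · simp [pvSufB, hh, h1, hng, pvA, pvL, h0, hz, he]
          · have hlen : (pvL r).length ≠ 0 := by simpa [List.length_eq_zero_iff] using he
            have hlz : ¬(((pvL r).length : Int) = 0) := by exact_mod_cast hlen
            simp [pvSufB, hh, h1, hng, pvA, pvL, h0, hz, he, hlz]
        · intro _
          have hL : pvL ((tag, v) :: r) = v :: pvL r := by simp [pvL, h1, h0]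
          rw [hL]
          by_cases he : pvL r = []
          · simp [he]
          · cases hev : pvL r with
            | nil => exact absurd hev he
            | cons a as =>
              rw [List.getLast?_cons_cons]
              rw [← hev, ht he]
              simp [he]
    · by_cases h2 : tag = "pop"
      · refine ⟨t, ?_, ?_⟩
        · simp [pvSufB, hh, h1, h2, pvA, pvL]
        · have : pvL ((tag, v) :: r) = pvL r := by simp [pvL, h1]
          rw [this]; exact ht
      · refine ⟨t, ?_, ?_⟩
        · simp [pvSufB, hh, h1, h2, pvA, pvL]
        · have : pvL ((tag, v) :: r) = pvL r := by simp [pvL, h1]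
          rw [this]; exact ht

theorem pvRun_cond (E : List (String × Int)) (s' : List Int) (ct t : Int)
    (ht : pvL E ≠ [] → (pvL E).getLast? = some t) :
    (∃ st, pvRun E s' = some st ∧ st ≠ [] ∧ st.getLast? = some ct) ↔
      (pvA E ≤ s'.length ∧ 1 ≤ s'.length - pvA E + (pvL E).length ∧
        (if (pvL E).length = 0 then s'[s'.length - pvA E - 1]?.getD 0 = ct else t = ct)) := by
  rw [pvRun_char]
  by_cases hA : pvA E ≤ s'.length
  · rw [if_pos hA]
    simp only [Option.some.injEq, exists_eq_left']
    by_cases hL : pvL E = []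
    · rw [hL]
      simp only [List.append_nil, List.length_nil, if_pos rfl]
      by_cases hk : 1 ≤ s'.length - pvA E
      · have hne : s'.take (s'.length - pvA E) ≠ [] := by
          simp [List.length_pos_iff.symm, List.length_take]; omega
        have hidx : s'.length - pvA E - 1 < s'.length := by omega
        have hgl : (s'.take (s'.length - pvA E)).getLast? = s'[s'.length - pvA E - 1]? := by
          rw [List.getLast?_eq_getElem?, List.length_take, List.getElem?_take_of_lt (by omega)]
          congr 1; omega
        rw [hgl, List.getElem?_eq_getElem hidx]
        simp [hne, hA, hk]
      · have h0 : s'.length - pvA E = 0 := by omega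
        simp [h0, hA]
    · have hlp : 0 < (pvL E).length := List.length_pos_iff.mpr hL
      have hgl : (s'.take (s'.length - pvA E) ++ pvL E).getLast? = some t := by
        rw [List.getLast?_append_of_ne_nil _ hL]; exact ht hL
      rw [hgl]
      have hnz : (pvL E).length ≠ 0 := by omega
      simp [hL, hA, hnz]
      omega
  · rw [if_neg hA]
    simp [hA]

theorem pvHitB_iff (mtag : String) (mv ct a l t : Int) (stack : List Int) :
    pvHitB mtag mv ct a l t stack = true ↔
      ((if mtag = "pop" then 0 < stack.length else True) ∧
        a ≤ (if mtag = "pop" then (stack.length : Int) - 1 else if mtag = "push" then (stack.length : Int) + 1 else (stack.length : Int)) ∧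
        1 ≤ (if mtag = "pop" then (stack.length : Int) - 1 else if mtag = "push" then (stack.length : Int) + 1 else (stack.length : Int)) - a + l ∧
        (if 0 < l then t
         else if mtag = "push" ∧ (if mtag = "pop" then (stack.length : Int) - 1 else if mtag = "push" then (stack.length : Int) + 1 else (stack.length : Int)) - a - 1 = (stack.length : Int) then mv
         else (PySem.List.pyGet? stack ((if mtag = "pop" then (stack.length : Int) - 1 else if mtag = "push" then (stack.length : Int) + 1 else (stack.length : Int)) - a - 1)).getD 0) = ct) := by
  unfold pvHitB
  by_cases h1 : mtag = "pop"
  · subst h1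
    simp [and_assoc]
  · by_cases h2 : mtag = "push"
    · subst h2
      simp [and_assoc]
    · simp [h1, h2, and_assoc]

theorem pvHit_iff (m : String × Int) (E : List (String × Int)) (stack : List Int) (ct t : Int)
    (ht : pvL E ≠ [] → (pvL E).getLast? = some t) :
    pvHitB m.1 m.2 ct (pvA E) ((pvL E).length) t stack = true ↔
      (∃ st, pvRun (m :: E) stack = some st ∧ st ≠ [] ∧ st.getLast? = some ct) := by
  obtain ⟨mt, mv⟩ := m
  by_cases hp : mt = "push"
  · subst hp
    rw [show pvRun (("push", mv) :: E) stack = pvRun E (stack ++ [mv]) by simp [pvRun]]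
    rw [pvRun_cond E (stack ++ [mv]) ct t ht, pvHitB_iff]
    simp only [List.length_append, List.length_singleton,
      show ¬(("push" : String) = "pop") from by decide,
      if_true, if_false, true_and]
    split_ifs with h1 h2 h3 <;> try omega
    · have hA0 : pvA E = 0 := by omega
      have hb : (stack ++ [mv])[stack.length + 1 - pvA E - 1]?.getD 0 = mv := by
        simp [hA0, List.getElem?_concat_length]
      rw [hb]; omega
    · by_cases hA : pvA E ≤ stack.length
      · have hcast : (stack.length : Int) + 1 - (pvA E : Int) - 1 = ((stack.length - pvA E : Nat) : Int) := by omega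
        rw [hcast, PySem.List.pyGet?_natCast]
        have hb : (stack ++ [mv])[stack.length + 1 - pvA E - 1]? = stack[stack.length - pvA E]? := by
          rw [show stack.length + 1 - pvA E - 1 = stack.length - pvA E from by omega]
          exact List.getElem?_append_left (by omega)
        rw [hb]; omega
      · omega
  · by_cases hq : mt = "pop"
    · subst hq
      by_cases hs : stack = []
      · subst hs
        rw [show pvRun (("pop", mv) :: E) ([] : List Int) = none from by simp [pvRun]]
        simp [pvHitB]
      · have hlen1 : 1 ≤ stack.length := List.length_pos_of_ne_nil hs
        rw [show pvRun (("pop", mv) :: E) stack = pvRun E stack.dropLast from by simp [pvRun, hs]]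
        rw [pvRun_cond E stack.dropLast ct t ht, pvHitB_iff]
        simp only [List.length_dropLast,
          show ((("pop" : String) = "pop") ↔ True) from by simp,
          show ((("pop" : String) = "push") ↔ False) from by simp,
          if_true, if_false, false_and, true_and]
        split_ifs with h1 h2 <;> try omega
        by_cases hA : pvA E + 2 ≤ stack.length
        · have hcast : (stack.length : Int) - 1 - (pvA E : Int) - 1 = ((stack.length - 1 - pvA E - 1 : Nat) : Int) := by omega
          rw [hcast, PySem.List.pyGet?_natCast]
          have hb : stack.dropLast[stack.length - 1 - pvA E - 1]? = stack[stack.length - 1 - pvA E - 1]? := by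
            rw [List.dropLast_eq_take]
            exact List.getElem?_take_of_lt (by omega)
          rw [hb]; omega
        · omega
    · rw [show pvRun ((mt, mv) :: E) stack = pvRun E stack from by simp [pvRun, hp, hq]]
      rw [pvRun_cond E stack ct t ht, pvHitB_iff]
      simp only [hp, hq, if_false, false_and, true_and]
      split_ifs with h1 h2 <;> try omega
      by_cases hA : pvA E + 1 ≤ stack.length
      · have hcast : (stack.length : Int) - (pvA E : Int) - 1 = ((stack.length - pvA E - 1 : Nat) : Int) := by omega
        rw [hcast, PySem.List.pyGet?_natCast]
        omega
      · omega

theorem pvCondA_iff (ops : List String) (mo : String) (ct : Int) (i : Nat) (stack : List Int)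
    (hpref : pvRun ((ops.take i).map pvParseB) [] = some stack) :
    (pvCondA ops mo ct i = true) ↔
      (∃ st, pvRun (pvParseB mo :: (ops.drop i).map pvParseB) stack = some st ∧
        st ≠ [] ∧ st.getLast? = some ct) := by
  unfold pvCondA
  have hrun := pvSimA_run (ops.take i ++ [mo] ++ ops.drop i) []
  rw [show (ops.take i ++ [mo] ++ ops.drop i).map pvParseB =
      (ops.take i).map pvParseB ++ (pvParseB mo :: (ops.drop i).map pvParseB) from by simp] at hrun
  rw [pvRun_append, hpref] at hrun
  simp only [Option.bind_some] at hrun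
  cases hv : (pvSimA (ops.take i ++ [mo] ++ ops.drop i) []).2
  · rw [hv] at hrun
    simp only [Bool.false_eq_true, if_false] at hrun
    constructor
    · intro h
      have hv' : (pvSimA (ops.take i ++ mo :: ops.drop i) []).2 = false := by
        simpa using hv
      simp [hv'] at h
    · rintro ⟨st, hst, -⟩
      rw [← hrun] at hst
      exact absurd hst (by simp)
  · rw [hv] at hrun
    simp only [if_true] at hrun
    simp only [hv, Bool.true_and, Bool.and_eq_true, decide_eq_true_iff]
    rw [← hrun]
    constructor
    · rintro ⟨h1, h2⟩
      refine ⟨_, rfl, h1, ?_⟩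
      rwa [PySem.List.pyGet?_neg_one] at h2
    · rintro ⟨st, hst, h1, h2⟩
      cases hst
      exact ⟨h1, by rwa [PySem.List.pyGet?_neg_one]⟩

theorem pvCondA_false_of_none (ops : List String) (mo : String) (ct : Int) (i0 : Nat)
    (h0 : pvRun ((ops.take i0).map pvParseB) [] = none) :
    ∀ j, i0 ≤ j → pvCondA ops mo ct j = false := by
  intro j hj
  have htk : ops.take j = ops.take i0 ++ (ops.drop i0).take (j - i0) := by
    rw [← List.take_add]
    congr 1
    omega
  have hnone : pvRun ((ops.take j ++ [mo] ++ ops.drop j).map pvParseB) [] = none := by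
    rw [show ops.take j ++ [mo] ++ ops.drop j =
        ops.take i0 ++ ((ops.drop i0).take (j - i0) ++ [mo] ++ ops.drop j) from by
      rw [htk]; simp]
    rw [List.map_append, pvRun_append, h0]
    rfl
  have hrun := pvSimA_run (ops.take j ++ [mo] ++ ops.drop j) []
  rw [hnone] at hrun
  unfold pvCondA
  cases hv : (pvSimA (ops.take j ++ [mo] ++ ops.drop j) []).2
  · simp only [hv, Bool.false_and, Bool.and_eq_true]
  · rw [hv] at hrun
    simp at hrun

theorem pvLoopA_all_false (ops : List String) (mo : String) (ct : Int) :
    ∀ (k i : Nat), (∀ j, i ≤ j → pvCondA ops mo ct j = false) → pvLoopA ops mo ct i k = -1 := by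
  intro k
  induction k with
  | zero => intro i _; rfl
  | succ k ih =>
    intro i h
    rw [pvLoopA, h i (Nat.le_refl i)]
    simp only [Bool.false_eq_true, if_neg]
    exact ih (i + 1) (fun j hj => h j (by omega))

theorem pvBoolEq {a b : Bool} (h : (a = true) ↔ (b = true)) : a = b := by
  cases a <;> cases b <;> simp_all

theorem pvMain (mo : String) (ct : Int) : ∀ (rest ops : List String) (i : Nat) (stack : List Int),
    ops.drop i = rest → i ≤ ops.length →
    pvRun ((ops.take i).map pvParseB) [] = some stack →
    pvLoopA ops mo ct i (rest.length + 1) =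
      pvLoopB (pvParseB mo).1 (pvParseB mo).2 ct i (rest.map pvParseB) (pvSufB (rest.map pvParseB)) stack := by
  intro rest
  induction rest with
  | nil =>
    intro ops i stack hdrop hle hpref
    have hcond := pvCondA_iff ops mo ct i stack hpref
    rw [hdrop] at hcond
    have hhit := pvHit_iff (pvParseB mo) [] stack ct 0 (by intro h; simp [pvL] at h)
    rw [show pvA ([] : List (String × Int)) = 0 from rfl,
        show pvL ([] : List (String × Int)) = [] from rfl] at hhit
    simp only [List.length_nil, Nat.cast_zero] at hhit
    have hbool : pvCondA ops mo ct i =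
        pvHitB (pvParseB mo).1 (pvParseB mo).2 ct 0 0 0 stack := by
      apply pvBoolEq
      rw [hcond, hhit]
      simp
    simp only [List.map_nil, show pvSufB [] = [(0, 0, 0)] from rfl, pvLoopB]
    rw [pvLoopA, hbool]
    cases h : pvHitB (pvParseB mo).1 (pvParseB mo).2 ct 0 0 0 stack <;> simp [h, pvLoopA]
  | cons op rest' ih =>
    intro ops i stack hdrop hle hpref
    have hlt : i < ops.length := by
      have := congrArg List.length hdrop
      simp [List.length_drop] at this
      omega
    have hdrop' : ops.drop (i + 1) = rest' := by
      have : (ops.drop i).tail = rest' := by rw [hdrop]; rfl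
      rwa [List.tail_drop] at this
    have hgi : ops[i]? = some op := by
      have h0 : (ops.drop i)[0]? = ops[i]? := by
        simpa using List.getElem?_drop ops i 0
      rw [hdrop] at h0
      simpa using h0.symm
    have htake' : ops.take (i + 1) = ops.take i ++ [op] := by
      rw [List.take_add_one, hgi]
      rfl
    obtain ⟨t0, hh, ht0⟩ := pvSufB_head ((op :: rest').map pvParseB)
    have hsufcons : pvSufB ((op :: rest').map pvParseB) =
        ((pvA ((op :: rest').map pvParseB) : Int),
          ((pvL ((op :: rest').map pvParseB)).length : Int), t0) :: pvSufB (rest'.map pvParseB) := by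
      rw [← hh]
      simp [pvSufB]
    have hcond := pvCondA_iff ops mo ct i stack hpref
    rw [hdrop] at hcond
    have hhit := pvHit_iff (pvParseB mo) ((op :: rest').map pvParseB) stack ct t0 ht0
    have hbool : pvCondA ops mo ct i =
        pvHitB (pvParseB mo).1 (pvParseB mo).2 ct (pvA ((op :: rest').map pvParseB))
          ((pvL ((op :: rest').map pvParseB)).length) t0 stack := by
      apply pvBoolEq
      rw [hcond, hhit]
    simp only [List.map_cons] at hbool hsufcons
    rw [show (op :: rest').length + 1 = (rest'.length + 1) + 1 from by simp]
    rw [pvLoopA]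
    simp only [List.map_cons, hsufcons, pvLoopB]
    rw [hbool]
    by_cases hHit : pvHitB (pvParseB mo).1 (pvParseB mo).2 ct
        ((pvA (pvParseB op :: rest'.map pvParseB) : Int))
        (((pvL (pvParseB op :: rest'.map pvParseB)).length : Int)) t0 stack = true
    · rw [if_pos hHit, if_pos hHit]
    · rw [if_neg hHit, if_neg hHit]
      rcases he : pvParseB op with ⟨tag, v⟩
      simp only [he]
      by_cases h1 : tag = "push"
      · subst h1
        rw [if_pos rfl]
        apply ih ops (i + 1) (stack ++ [v]) hdrop' (by omega)
        rw [htake', List.map_append, pvRun_append, hpref]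
        simp [pvRun, he]
      · by_cases h2 : tag = "pop"
        · subst h2
          rw [if_neg (by decide), if_pos rfl]
          by_cases hs : stack = []
          · rw [if_pos hs]
            subst hs
            apply pvLoopA_all_false
            apply pvCondA_false_of_none ops mo ct (i + 1)
            rw [htake', List.map_append, pvRun_append, hpref]
            simp [pvRun, he]
          · rw [if_neg hs]
            apply ih ops (i + 1) stack.dropLast hdrop' (by omega)
            rw [htake', List.map_append, pvRun_append, hpref]
            simp [pvRun, he, hs]
        · rw [if_neg h1, if_neg h2]
          apply ih ops (i + 1) stack hdrop' (by omega)
          rw [htake', List.map_append, pvRun_append, hpref]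
          simp [pvRun, he, h1, h2]

-- ===== VERDICT (by name: the statement is the Claim_ definition above) =====
theorem findMissingOperationIndex_spec : Claim_equal_findMissingOperationIndex := by
  intro ops mo ct _ _
  unfold Spec_findMissingOperationIndex findMissingOperationIndex findMissingOperationIndex_alt
  have h := pvMain mo ct ops ops 0 [] rfl (Nat.zero_le _) rfl
  simpa using h
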